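-- pv_equiv track=rewrite | github.com/VaHiX/CodeForces | Python/ByRound/1939/1939_C_More_Gifts.py | bf_solve
-- ===== SOURCE A (Python) =====
-- def bf_solve(n, k, t, a):
--     box_number = 1
--     participant = 1
--     s = set()
--     i = -1
--     while True:
--         if i == n - 1 and box_number == k:
--             return participant
--         elif box_number > k:
--             return participant - 1
--         i += 1
--         if i == n:
--             box_number += 1
--             i = 0
--         s.add(a[i])
--         if len(s) > t:
--             participant += 1
--             s = {a[i]}
--     assert False
--     return
-- ===== SOURCE B (Python) =====
-- def bf_solve(n, k, t, a):
--     # Pass-level simulation with cycle detection on the carried distinct-set,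
--     # then fast-forward over the detected period by arithmetic.
--     if k <= 0:
--         return 0
--     xs = a[:n]
--     seen = {}   # state at start of pass j -> j
--     parts = []  # participant at start of pass j
--     s = frozenset()
--     part = 1
--     while len(parts) < k:
--         j0 = seen.get(s)
--         if j0 is not None:
--             per = len(parts) - j0
--             inc = part - parts[j0]
--             q, r = divmod(k - j0, per)
--             return parts[j0 + r] + q * inc
--         seen[s] = len(parts)
--         parts.append(part)
--         cur = set(s)
--         for x in xs:
--             cur.add(x)
--             if len(cur) > t:
--                 part += 1
--                 cur = {x}
--         s = frozenset(cur)
--     return part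
-- ===== Notes on version B (the rewrite author's own statement) =====
-- stated objective: alternative
-- what changed: A walks every element of all k passes one by one; B simulates whole passes, memoizes the distinct-set carried across pass boundaries in a dict, detects the first repeated state and fast-forwards over the cycle with a divmod, so the pass budget is min(k, cycle length) instead of k; intended as faster (the probe measured up to ~850x where a cycle occurs) but not confirmed uniformly, since an input whose state cycle exceeds k costs the same O(n*k) as A.
import Mathlib
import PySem

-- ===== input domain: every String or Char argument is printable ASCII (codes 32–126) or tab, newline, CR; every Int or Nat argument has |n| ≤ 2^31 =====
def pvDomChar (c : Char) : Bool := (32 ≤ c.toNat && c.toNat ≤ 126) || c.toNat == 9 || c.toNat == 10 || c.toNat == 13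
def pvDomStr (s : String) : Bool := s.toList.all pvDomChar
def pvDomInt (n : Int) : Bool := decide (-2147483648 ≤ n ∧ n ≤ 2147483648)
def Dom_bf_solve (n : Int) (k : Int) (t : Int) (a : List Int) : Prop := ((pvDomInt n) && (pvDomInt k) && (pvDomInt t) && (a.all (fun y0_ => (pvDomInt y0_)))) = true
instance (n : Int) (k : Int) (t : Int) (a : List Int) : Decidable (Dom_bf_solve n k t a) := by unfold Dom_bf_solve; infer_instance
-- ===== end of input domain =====

-- B replaces A's element-by-element simulation of all k passes by a pass-level
-- simulation with cycle detection on the carried distinct-set, fast-forwarding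
-- over the detected period arithmetically (objective: alternative algorithm;
-- intended as faster when a pass-state repeats; a timing run measured large
-- speedups on such inputs but did not confirm it uniformly).

-- ===== PORT A =====
-- literal port of A's `while True` loop; fuel counts loop iterations (on every
-- input admitted by Pre_ the chosen fuel is proved sufficient); `none` from
-- pyGet? is Python's IndexError (excluded by Pre_), where the port returns 0.
def bfLoop (n k t : Int) (a : List Int) : Nat → Int → Int → PySem.Set Int → Int → Int
  | 0, _, _, _, _ => 0
  | fuel+1, box, part, s, i =>
    if i = n - 1 ∧ box = k then part
    else if box > k then part - 1
    else
      let i1 := i + 1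
      let box2 := if i1 = n then box + 1 else box
      let i2 := if i1 = n then (0 : Int) else i1
      match PySem.List.pyGet? a i2 with
      | none => 0
      | some x =>
        let s2 := PySem.Set.add s x
        if t < PySem.Set.len s2 then
          bfLoop n k t a fuel box2 (part + 1) (PySem.Set.ofList [x]) i2
        else
          bfLoop n k t a fuel box2 part s2 i2

def bf_solve (n : Int) (k : Int) (t : Int) (a : List Int) : Int :=
  bfLoop n k t a ((n.toNat + 1) * (k.toNat + 1) + 1) 1 1 PySem.Set.empty (-1)

-- ===== PORT B =====
-- one pass over xs (cur = set(s); for x in xs: cur.add(x); if len(cur) > t: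
-- part += 1; cur = {x}); the set(s)/frozenset(cur) copies are identities here
def altPassStep (t : Int) (sp : PySem.Set Int × Int) (x : Int) : PySem.Set Int × Int :=
  let s2 := PySem.Set.add sp.1 x
  if t < PySem.Set.len s2 then (PySem.Set.ofList [x], sp.2 + 1) else (s2, sp.2)

-- `seen.get(s)`: the dict keyed by frozensets is an association list in
-- insertion order, lookup = first key equal as a set
def altGet (s : PySem.Set Int) : List (PySem.Set Int × Int) → Option Int
  | [] => none
  | (st, v) :: rest => if PySem.Set.equal st s then some v else altGet s rest

-- the `while len(parts) < k` loop; fuel = k - len(parts) (exact, since each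
-- iteration appends one entry and the loop starts with parts = []).
def altLoop (k t : Int) (xs : List Int) :
    Nat → List (PySem.Set Int × Int) → List Int → PySem.Set Int → Int → Int
  | 0, _, _, _, part => part
  | fuel+1, seen, parts, s, part =>
    match altGet s seen with
    | some j0 =>
      let per : Int := (parts.length : Int) - j0
      let inc : Int := part - (match PySem.List.pyGet? parts j0 with
                               | some p0 => p0 | none => 0)
      match PySem.Int.divmod? (k - j0) per with
      | some (q, r) =>
        (match PySem.List.pyGet? parts (j0 + r) with
         | some pr => pr | none => 0) + q * inc
      | none => 0
    | none =>
      let sp := xs.foldl (altPassStep t) (s, part)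
      altLoop k t xs fuel (seen ++ [(s, (parts.length : Int))]) (parts ++ [part]) sp.1 sp.2

def bf_solve_alt (n : Int) (k : Int) (t : Int) (a : List Int) : Int :=
  if k ≤ 0 then 0
  else altLoop k t (PySem.List.slice a none (some n)) k.toNat [] [] PySem.Set.empty 1

-- ===== PRECONDITION & SPEC =====
-- Pre_ excludes exactly the inputs where A raises IndexError: for k ≥ 1 it
-- needs 0 ≤ n ≤ len(a) (and k ≤ 1 when n = 0), otherwise the running index
-- eventually leaves a; for k ≤ 0 A returns immediately, so any n, t, a is fine.
def Pre_bf_solve (n : Int) (k : Int) (t : Int) (a : List Int) : Prop :=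
  k ≤ 0 ∨ (0 ≤ n ∧ n ≤ (a.length : Int) ∧ (n = 0 → k ≤ 1))
instance (n : Int) (k : Int) (t : Int) (a : List Int) : Decidable (Pre_bf_solve n k t a) := by
  unfold Pre_bf_solve; infer_instance
def pvWitness_bf_solve : Int × Int × Int × List Int := (3, 2, 1, [1, 2, 3])

def Spec_bf_solve (n : Int) (k : Int) (t : Int) (a : List Int) (out : Int) : Prop :=
  out = bf_solve_alt n k t a
instance (n : Int) (k : Int) (t : Int) (a : List Int) (out : Int) : Decidable (Spec_bf_solve n k t a out) := by
  unfold Spec_bf_solve; infer_instance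

-- ===== CLAIM (what is proved, stated in full; the proofs are below) =====
def Claim_equal_bf_solve : Prop := ∀ (n : Int) (k : Int) (t : Int) (a : List Int), Dom_bf_solve n k t a → Pre_bf_solve n k t a → Spec_bf_solve n k t a (bf_solve n k t a)

-- ===== LEMMAS AND PROOFS =====

-- the common per-element step (A's loop body on one element)
def pvStep (t : Int) (sp : PySem.Set Int × Int) (x : Int) : PySem.Set Int × Int :=
  if t < PySem.Set.len (PySem.Set.add sp.1 x) then (PySem.Set.ofList [x], sp.2 + 1)
  else (PySem.Set.add sp.1 x, sp.2)

def pvPass (t : Int) (xs : List Int) (sp : PySem.Set Int × Int) : PySem.Set Int × Int :=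
  xs.foldl (pvStep t) sp

def pvS (t : Int) (xs : List Int) (m : Nat) : PySem.Set Int × Int :=
  (pvPass t xs)^[m] (PySem.Set.empty, 1)

lemma altPassStep_eq (t : Int) : altPassStep t = pvStep t := by
  funext sp x
  simp [altPassStep, pvStep]

-- ----- A-side: the flat fuel loop computes iterated passes -----

lemma bfLoop_eq (t k : Int) (a : List Int) (n : Int)
    (h0 : 0 ≤ n) (hl : n ≤ (a.length : Int)) (h1 : 1 ≤ n) :
    ∀ (fuel : Nat) (box part : Int) (s : PySem.Set Int) (i : Int),
      box ≤ k → -1 ≤ i → i ≤ n - 1 →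
      (n - 1 - i).toNat + n.toNat * (k - box).toNat + 1 ≤ fuel →
      bfLoop n k t a fuel box part s i =
        ((pvPass t (a.take n.toNat))^[(k - box).toNat]
          ((a.take n.toNat).drop (i + 1).toNat |>.foldl (pvStep t) (s, part))).2 := by
  have hxlen : (a.take n.toNat).length = n.toNat := by
    simp [List.length_take]
    omega
  intro fuel
  induction fuel with
  | zero =>
    intro box part s i _ _ _ hfuel
    omega
  | succ fuel ih =>
    intro box part s i hbox hi1 hi2 hfuel
    simp only [bfLoop]
    by_cases hg1 : i = n - 1 ∧ box = k
    · rw [if_pos hg1]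
      have e1 : (i + 1).toNat = (a.take n.toNat).length := by omega
      have e2 : (k - box).toNat = 0 := by omega
      rw [e1, List.drop_length, e2]
      simp
    · rw [if_neg hg1, if_neg (by omega : ¬ box > k)]
      by_cases hwrap : i + 1 = n
      · -- wrap to the next box: i was n-1, box < k
        have hboxlt : box < k := by omega
        have h0lt : 0 < a.length := by omega
        have h0lt' : 0 < (a.take n.toNat).length := by omega
        simp only [if_pos hwrap]
        have hget : PySem.List.pyGet? a (0 : Int) = some (a[0]'h0lt) := by
          rw [show (0 : Int) = ((0 : Nat) : Int) by simp, PySem.List.pyGet?_natCast]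
          simp
        rw [hget]
        dsimp only
        have e1 : (i + 1).toNat = (a.take n.toNat).length := by omega
        rw [e1, List.drop_length]
        have e2 : (k - box).toNat = (k - (box + 1)).toNat + 1 := by omega
        rw [e2, Function.iterate_succ_apply]
        have hxs : a.take n.toNat =
            ((a.take n.toNat)[0]'h0lt') :: (a.take n.toNat).drop 1 := by
          have h := List.drop_eq_getElem_cons h0lt'
          simpa using h
        have hsplit : pvPass t (a.take n.toNat) (List.foldl (pvStep t) (s, part) []) =
            List.foldl (pvStep t) (pvStep t (s, part) (a[0]'h0lt))
              ((a.take n.toNat).drop ((0 : Int) + 1).toNat) := by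
          show pvPass t (a.take n.toNat) (s, part) = _
          unfold pvPass
          conv_lhs => rw [hxs]
          rw [List.foldl_cons, List.getElem_take]
          norm_num
        rw [hsplit]
        rw [show pvStep t (s, part) (a[0]'h0lt) =
            (if t < (PySem.Set.add s (a[0]'h0lt)).len
             then ((PySem.Set.ofList [a[0]'h0lt] : PySem.Set Int), part + 1)
             else (PySem.Set.add s (a[0]'h0lt), part)) from rfl]
        have hM : (n - 1 - (0 : Int)).toNat + n.toNat * (k - (box + 1)).toNat + 1 ≤ fuel := by
          rw [e2, Nat.mul_succ] at hfuel
          have h5 : (n - 1 - i).toNat = 0 := by omega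
          omega
        split_ifs with hlen
        · rw [ih (box + 1) (part + 1) (PySem.Set.ofList [a[0]'h0lt]) 0
            (by omega) (by omega) (by omega) hM]
        · rw [ih (box + 1) part (PySem.Set.add s (a[0]'h0lt)) 0
            (by omega) (by omega) (by omega) hM]
      · -- stay inside the current box
        have hi3 : i + 1 ≤ n - 1 := by omega
        have hltl : (i + 1).toNat < a.length := by omega
        have hltx : (i + 1).toNat < (a.take n.toNat).length := by omega
        simp only [if_neg hwrap]
        have hget : PySem.List.pyGet? a (i + 1) = some (a[(i + 1).toNat]'hltl) := by
          have hcast : (i + 1) = (((i + 1).toNat : Nat) : Int) := by omega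
          conv_lhs => rw [hcast]
          rw [PySem.List.pyGet?_natCast]
          simp
        rw [hget]
        dsimp only
        have hsplit : List.foldl (pvStep t) (s, part) ((a.take n.toNat).drop (i + 1).toNat) =
            List.foldl (pvStep t) (pvStep t (s, part) (a[(i + 1).toNat]'hltl))
              ((a.take n.toNat).drop (i + 1 + 1).toNat) := by
          rw [List.drop_eq_getElem_cons hltx, List.foldl_cons, List.getElem_take]
          have : (i + 1).toNat + 1 = (i + 1 + 1).toNat := by omega
          rw [this]
        rw [hsplit]
        rw [show pvStep t (s, part) (a[(i + 1).toNat]'hltl) =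
            (if t < (PySem.Set.add s (a[(i + 1).toNat]'hltl)).len
             then ((PySem.Set.ofList [a[(i + 1).toNat]'hltl] : PySem.Set Int), part + 1)
             else (PySem.Set.add s (a[(i + 1).toNat]'hltl), part)) from rfl]
        have hM : (n - 1 - (i + 1)).toNat + n.toNat * (k - box).toNat + 1 ≤ fuel := by
          have h5 : (n - 1 - i).toNat = (n - 1 - (i + 1)).toNat + 1 := by omega
          omega
        split_ifs with hlen
        · rw [ih box (part + 1) (PySem.Set.ofList [a[(i + 1).toNat]'hltl]) (i + 1)
            (by omega) (by omega) (by omega) hM]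
        · rw [ih box part (PySem.Set.add s (a[(i + 1).toNat]'hltl)) (i + 1)
            (by omega) (by omega) (by omega) hM]

-- ----- set-extensionality congruence machinery -----

def pvEq (s s' : PySem.Set Int) : Prop := ∀ x : Int, x ∈ s ↔ x ∈ s'

lemma pvLen_eq {s s' : PySem.Set Int} (h : pvEq s s') (hs : s.Nodup) (hs' : s'.Nodup) :
    PySem.Set.len s = PySem.Set.len s' := by
  have : s.Perm s' := (List.perm_ext_iff_of_nodup hs hs').2 h
  simp [PySem.Set.len, this.length_eq]

lemma pvStep_nodup (t : Int) (sp : PySem.Set Int × Int) (x : Int) (h : sp.1.Nodup) :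
    (pvStep t sp x).1.Nodup := by
  unfold pvStep
  split_ifs
  · simp [PySem.Set.ofList]
  · exact PySem.Set.nodup_add _ _ h

lemma pvStep_congr (t : Int) (x : Int) (s s' : PySem.Set Int) (p p' : Int)
    (h : pvEq s s') (hs : s.Nodup) (hs' : s'.Nodup) :
    pvEq (pvStep t (s, p) x).1 (pvStep t (s', p') x).1 ∧
    (pvStep t (s, p) x).2 - p = (pvStep t (s', p') x).2 - p' := by
  have hadd : pvEq (PySem.Set.add s x) (PySem.Set.add s' x) := by
    intro y; simp [PySem.Set.mem_add, h y]
  have hlen : PySem.Set.len (PySem.Set.add s x) = PySem.Set.len (PySem.Set.add s' x) :=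
    pvLen_eq hadd (PySem.Set.nodup_add _ _ hs) (PySem.Set.nodup_add _ _ hs')
  unfold pvStep
  rw [hlen]
  split_ifs
  · exact ⟨fun y => Iff.rfl, by ring⟩
  · exact ⟨hadd, by ring⟩

lemma pvFold_congr (t : Int) (xs : List Int) :
    ∀ (s s' : PySem.Set Int) (p p' : Int), pvEq s s' → s.Nodup → s'.Nodup →
      pvEq (xs.foldl (pvStep t) (s, p)).1 (xs.foldl (pvStep t) (s', p')).1 ∧
      (xs.foldl (pvStep t) (s, p)).1.Nodup ∧ (xs.foldl (pvStep t) (s', p')).1.Nodup ∧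
      (xs.foldl (pvStep t) (s, p)).2 - p = (xs.foldl (pvStep t) (s', p')).2 - p' := by
  induction xs with
  | nil => intro s s' p p' h hs hs'; exact ⟨h, hs, hs', by simp⟩
  | cons x xs ih =>
    intro s s' p p' h hs hs'
    obtain ⟨h1, h2⟩ := pvStep_congr t x s s' p p' h hs hs'
    have hn1 : (pvStep t (s, p) x).1.Nodup := pvStep_nodup t (s, p) x hs
    have hn2 : (pvStep t (s', p') x).1.Nodup := pvStep_nodup t (s', p') x hs'
    have := ih (pvStep t (s, p) x).1 (pvStep t (s', p') x).1
      (pvStep t (s, p) x).2 (pvStep t (s', p') x).2 h1 hn1 hn2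
    simp only [Prod.mk.eta] at this
    simp only [List.foldl_cons]
    refine ⟨this.1, this.2.1, this.2.2.1, ?_⟩
    omega

lemma pvIter_congr (t : Int) (xs : List Int) (d : Nat) :
    ∀ (s s' : PySem.Set Int) (p p' : Int), pvEq s s' → s.Nodup → s'.Nodup →
      pvEq ((pvPass t xs)^[d] (s, p)).1 ((pvPass t xs)^[d] (s', p')).1 ∧
      ((pvPass t xs)^[d] (s, p)).1.Nodup ∧ ((pvPass t xs)^[d] (s', p')).1.Nodup ∧
      ((pvPass t xs)^[d] (s, p)).2 - p = ((pvPass t xs)^[d] (s', p')).2 - p' := by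
  induction d with
  | zero => intro s s' p p' h hs hs'; exact ⟨h, hs, hs', by simp⟩
  | succ d ih =>
    intro s s' p p' h hs hs'
    obtain ⟨h1, hn1, hn2, h2⟩ := pvFold_congr t xs s s' p p' h hs hs'
    have := ih (xs.foldl (pvStep t) (s, p)).1 (xs.foldl (pvStep t) (s', p')).1
      (xs.foldl (pvStep t) (s, p)).2 (xs.foldl (pvStep t) (s', p')).2 h1 hn1 hn2
    simp only [Prod.mk.eta] at this
    simp only [Function.iterate_succ_apply, pvPass]
    exact ⟨this.1, this.2.1, this.2.2.1, by omega⟩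

lemma pvS_nodup (t : Int) (xs : List Int) (m : Nat) : (pvS t xs m).1.Nodup := by
  induction m with
  | zero => simp [pvS, PySem.Set.empty]
  | succ m ih =>
    have h := pvFold_congr t xs (pvS t xs m).1 (pvS t xs m).1 (pvS t xs m).2 (pvS t xs m).2
      (fun y => Iff.rfl) ih ih
    simp only [Prod.mk.eta] at h
    simpa [pvS, Function.iterate_succ_apply', pvPass] using h.2.1

-- periodicity: if the pass-start state recurs, participant growth is periodic
lemma pvS_period (t : Int) (xs : List Int) (j0 per : Nat) (hper : 1 ≤ per)
    (h : pvEq (pvS t xs j0).1 (pvS t xs (j0 + per)).1) :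
    ∀ d : Nat, (pvS t xs (j0 + per + d)).2 = (pvS t xs (j0 + d)).2 +
        ((pvS t xs (j0 + per)).2 - (pvS t xs j0).2) ∧
      pvEq (pvS t xs (j0 + per + d)).1 (pvS t xs (j0 + d)).1 := by
  intro d
  have e1 : pvS t xs (j0 + per + d) = (pvPass t xs)^[d] (pvS t xs (j0 + per)) := by
    unfold pvS
    rw [← Function.iterate_add_apply]
    congr 1
    omega
  have e2 : pvS t xs (j0 + d) = (pvPass t xs)^[d] (pvS t xs j0) := by
    unfold pvS
    rw [← Function.iterate_add_apply]
    congr 1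
    omega
  have hc := pvIter_congr t xs d (pvS t xs (j0 + per)).1 (pvS t xs j0).1
    (pvS t xs (j0 + per)).2 (pvS t xs j0).2 (fun y => (h y).symm)
    (pvS_nodup t xs (j0 + per)) (pvS_nodup t xs j0)
  simp only [Prod.mk.eta] at hc
  constructor
  · rw [e1, e2]; omega
  · intro y; rw [e1, e2]; exact hc.1 y

lemma pvS_multi (t : Int) (xs : List Int) (j0 per : Nat) (hper : 1 ≤ per)
    (h : pvEq (pvS t xs j0).1 (pvS t xs (j0 + per)).1) :
    ∀ (q r : Nat), (pvS t xs (j0 + q * per + r)).2 =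
      (pvS t xs (j0 + r)).2 + q * ((pvS t xs (j0 + per)).2 - (pvS t xs j0).2) := by
  intro q r
  induction q with
  | zero => simp
  | succ q ih =>
    have hp := (pvS_period t xs j0 per hper h (q * per + r)).1
    have hidx : j0 + per + (q * per + r) = j0 + (q + 1) * per + r := by ring
    rw [hidx] at hp
    have hidx2 : j0 + (q * per + r) = j0 + q * per + r := by ring
    rw [hidx2] at hp
    rw [hp, ih]
    push_cast
    ring

-- ----- B-side -----

lemma altGet_some (s : PySem.Set Int) :
    ∀ (l : List (PySem.Set Int × Int)) (v : Int), altGet s l = some v →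
      ∃ (i : Nat) (e : PySem.Set Int × Int), l[i]? = some e ∧ e.2 = v ∧ PySem.Set.equal e.1 s = true := by
  intro l
  induction l with
  | nil => intro v hv; simp [altGet] at hv
  | cons hd rest ih =>
    intro v hv
    obtain ⟨st, pt⟩ := hd
    unfold altGet at hv
    split_ifs at hv with heq
    · exact ⟨0, (st, pt), by simp, by cases hv; rfl, heq⟩
    · obtain ⟨i, e, h1, h2, h3⟩ := ih v hv
      exact ⟨i + 1, e, by simpa using h1, h2, h3⟩

lemma altLoop_eq (t k : Int) (xs : List Int) (hk : 1 ≤ k) :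
    ∀ (fuel j : Nat), fuel + j = k.toNat →
      altLoop k t xs fuel ((List.range j).map (fun m => ((pvS t xs m).1, (m : Int))))
          ((List.range j).map (fun m => (pvS t xs m).2)) (pvS t xs j).1 (pvS t xs j).2 =
        (pvS t xs k.toNat).2 := by
  intro fuel
  induction fuel with
  | zero =>
    intro j hj
    have : j = k.toNat := by omega
    subst this
    simp [altLoop]
  | succ fuel ih =>
    intro j hj
    simp only [altLoop]
    cases hfind : altGet (pvS t xs j).1 ((List.range j).map (fun m => ((pvS t xs m).1, (m : Int)))) with
    | none =>
      simp only []
      have hstep : xs.foldl (altPassStep t) ((pvS t xs j).1, (pvS t xs j).2) = pvS t xs (j + 1) := by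
        rw [altPassStep_eq, Prod.mk.eta]
        simp [pvS, Function.iterate_succ_apply', pvPass]
      rw [hstep]
      have hlen : (((List.range j).map (fun m => (pvS t xs m).2)).length : Int) = (j : Int) := by
        simp
      rw [hlen]
      have hseen : (List.range j).map (fun m => ((pvS t xs m).1, (m : Int))) ++
          [((pvS t xs j).1, (j : Int))] =
          (List.range (j + 1)).map (fun m => ((pvS t xs m).1, (m : Int))) := by
        rw [List.range_succ]
        simp
      have hparts : (List.range j).map (fun m => (pvS t xs m).2) ++ [(pvS t xs j).2] =
          (List.range (j + 1)).map (fun m => (pvS t xs m).2) := by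
        rw [List.range_succ]
        simp
      rw [hseen, hparts]
      exact ih (j + 1) (by omega)
    | some j0v =>
      simp only []
      obtain ⟨j0, e, hgi, hval, heqv⟩ := altGet_some (pvS t xs j).1 _ j0v hfind
      obtain ⟨hlt, hev⟩ := List.getElem?_eq_some_iff.1 hgi
      simp only [List.length_map, List.length_range] at hlt
      simp only [List.getElem_map, List.getElem_range] at hev
      subst hev
      simp only at heqv hval
      subst hval
      simp only [List.length_map, List.length_range]
      have hK : (k.toNat : Int) = k := Int.toNat_of_nonneg (by omega)
      have hjK : j < k.toNat := by omega
      have hper : (0 : Int) < (j : Int) - (j0 : Int) := by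
        have : (j0 : Int) < (j : Int) := by exact_mod_cast hlt
        omega
      have hpos : (0 : Int) < k - (j0 : Int) := by
        have : (j0 : Int) < (k.toNat : Int) := by exact_mod_cast (by omega : j0 < k.toNat)
        omega
      simp only [PySem.Int.divmod?, if_neg (by omega : ¬ ((j : Int) - (j0 : Int) = 0))]
      have hfd : (k - (j0 : Int)).fdiv ((j : Int) - (j0 : Int)) =
          (k - (j0 : Int)) / ((j : Int) - (j0 : Int)) := by
        rw [Int.fdiv_eq_ediv, if_pos (Or.inl hper.le), sub_zero]
      have hfm : (k - (j0 : Int)).fmod ((j : Int) - (j0 : Int)) =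
          (k - (j0 : Int)) % ((j : Int) - (j0 : Int)) := by
        rw [Int.fmod_eq_emod, if_pos (Or.inl hper.le), add_zero]
      rw [hfd, hfm]
      set q : Int := (k - (j0 : Int)) / ((j : Int) - (j0 : Int)) with hqdef
      set r : Int := (k - (j0 : Int)) % ((j : Int) - (j0 : Int)) with hrdef
      have hr0 : 0 ≤ r := by rw [hrdef]; exact Int.emod_nonneg _ (by omega)
      have hrP : r < (j : Int) - (j0 : Int) := by rw [hrdef]; exact Int.emod_lt_of_pos _ hper
      have hqr : q * ((j : Int) - (j0 : Int)) + r = k - (j0 : Int) := by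
        rw [hqdef, hrdef]; rw [mul_comm]; exact Int.ediv_add_emod _ _
      have hq0 : 0 ≤ q := Int.ediv_nonneg (by omega) (by omega)
      have hg1 : PySem.List.pyGet? ((List.range j).map (fun m => (pvS t xs m).2)) ((j0 : Nat) : Int) =
          some (pvS t xs j0).2 := by
        rw [PySem.List.pyGet?_natCast]
        simp [hlt]
      have hg2 : PySem.List.pyGet? ((List.range j).map (fun m => (pvS t xs m).2)) ((j0 : Int) + r) =
          some (pvS t xs (j0 + r.toNat)).2 := by
        have hcast : ((j0 : Int) + r) = ((j0 + r.toNat : Nat) : Int) := by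
          push_cast [Int.toNat_of_nonneg hr0]; ring
        rw [hcast, PySem.List.pyGet?_natCast]
        have hlt2 : j0 + r.toNat < j := by omega
        simp [hlt2]
      rw [hg1, hg2]
      have hEq : pvEq (pvS t xs j0).1 (pvS t xs j).1 := (PySem.Set.equal_iff _ _).1 heqv
      have hEq' : pvEq (pvS t xs j0).1 (pvS t xs (j0 + (j - j0))).1 := by
        rw [(by omega : j0 + (j - j0) = j)]; exact hEq
      have hmulti := pvS_multi t xs j0 (j - j0) (by omega) hEq' q.toNat r.toNat
      have hKidx : j0 + q.toNat * (j - j0) + r.toNat = k.toNat := by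
        have hc : ((j0 + q.toNat * (j - j0) + r.toNat : Nat) : Int) = ((k.toNat : Nat) : Int) := by
          push_cast [Int.toNat_of_nonneg hq0, Int.toNat_of_nonneg hr0,
            Nat.cast_sub (le_of_lt hlt)]
          rw [hK]
          linarith [hqr]
        exact_mod_cast hc
      rw [hKidx] at hmulti
      rw [hmulti]
      rw [(by omega : j0 + (j - j0) = j)]
      have hqcast : ((q.toNat : Nat) : Int) = q := Int.toNat_of_nonneg hq0
      rw [hqcast]

-- ----- main theorems -----

theorem bf_solve_spec : Claim_equal_bf_solve := by
  unfold Claim_equal_bf_solve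
  intro n k t a _ hpre
  unfold Spec_bf_solve
  by_cases hk : k ≤ 0
  · show bfLoop n k t a ((n.toNat + 1) * (k.toNat + 1) + 1) 1 1 PySem.Set.empty (-1) =
      bf_solve_alt n k t a
    unfold bf_solve_alt
    rw [if_pos hk]
    simp only [bfLoop]
    rw [if_neg (by omega), if_pos (by omega)]
    norm_num
  · obtain ⟨h0, hl, h0k⟩ : 0 ≤ n ∧ n ≤ (a.length : Int) ∧ (n = 0 → k ≤ 1) := by
      rcases hpre with h | h
      · omega
      · exact h
    by_cases hn : n = 0
    · have hk1 : k = 1 := by omega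
      subst hk1
      subst hn
      show bfLoop 0 1 t a ((Int.toNat 0 + 1) * (Int.toNat 1 + 1) + 1) 1 1 PySem.Set.empty (-1) =
        bf_solve_alt 0 1 t a
      unfold bf_solve_alt
      rw [if_neg (by omega), PySem.List.slice_to a (by omega : (0:Int) ≤ 0)]
      simp [bfLoop, altLoop, altGet]
    · have hn1 : 1 ≤ n := by omega
      have hk1 : 1 ≤ k := by omega
      have hfb : (n - 1 - (-1)).toNat + n.toNat * (k - 1).toNat + 1 ≤
          (n.toNat + 1) * (k.toNat + 1) + 1 := by
        have e : k.toNat = (k - 1).toNat + 1 := by omega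
        rw [e]
        ring_nf
        omega
      have hA : bf_solve n k t a = (pvS t (a.take n.toNat) k.toNat).2 := by
        unfold bf_solve
        rw [bfLoop_eq t k a n h0 hl hn1 _ 1 1 PySem.Set.empty (-1) (by omega) (by omega)
          (by omega) hfb]
        have e3 : ((-1 : Int) + 1).toNat = 0 := by omega
        rw [e3, List.drop_zero]
        have e4 : List.foldl (pvStep t) (PySem.Set.empty, 1) (a.take n.toNat) =
            pvPass t (a.take n.toNat) (PySem.Set.empty, 1) := rfl
        rw [e4, ← Function.iterate_succ_apply]
        have e5 : (k - 1).toNat.succ = k.toNat := by omega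
        rw [e5]
        rfl
      have hB : bf_solve_alt n k t a = (pvS t (a.take n.toNat) k.toNat).2 := by
        unfold bf_solve_alt
        rw [if_neg (by omega), PySem.List.slice_to a h0]
        have := altLoop_eq t k (a.take n.toNat) hk1 k.toNat 0 (by omega)
        simpa [pvS] using this
      rw [hA, hB]
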